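-- pv_equiv track=rewrite | github.com/cayd/AlphaSpectrumPeakFitting | peak_fit.py | make_composite
-- ===== SOURCE A (Python) =====
-- def make_composite(l):
--     longest_len = 0
--     for i in l:
--         if len(i) > longest_len:
--             longest_len = len(i)
--     c = [0] * longest_len
--     for i in range(len(l)):
--         for j in range(longest_len):
--             try:
--                 c[j] += l[i][j]
--             except:
--                 pass
--     return c
-- ===== SOURCE B (Python) =====
-- def make_composite(l):
--     acc = {}
--     for row in l:
--         for j, v in enumerate(row):
--             acc[j] = acc.get(j, 0) + v
--     return [acc[j] for j in range(len(acc))]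
-- ===== Notes on version B (the rewrite author's own statement) =====
-- stated objective: alternative
-- what changed: Replaces A's max-length pre-scan plus full-width row-major index double loop with try/except by a single pass that accumulates each present element into a dictionary keyed by its column index (built with enumerate), then reads the composite off the dict; no padding or exception handling is ever needed.
import Mathlib
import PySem

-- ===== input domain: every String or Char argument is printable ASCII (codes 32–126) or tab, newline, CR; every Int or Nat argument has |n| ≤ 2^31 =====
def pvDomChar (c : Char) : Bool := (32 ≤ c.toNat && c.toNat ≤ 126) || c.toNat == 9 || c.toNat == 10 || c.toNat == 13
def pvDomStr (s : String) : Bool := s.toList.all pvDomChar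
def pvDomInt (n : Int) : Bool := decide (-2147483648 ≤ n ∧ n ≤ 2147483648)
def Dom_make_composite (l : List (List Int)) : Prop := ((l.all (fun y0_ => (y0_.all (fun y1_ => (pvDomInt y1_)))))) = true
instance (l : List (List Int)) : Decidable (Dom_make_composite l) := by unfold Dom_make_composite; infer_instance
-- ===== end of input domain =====

-- B replaces A's max-length pre-scan and full-width index double loop (with try/except)
-- by one pass accumulating each present element into a dict keyed by its column index
-- (alternative decomposition; same result, no padding/exception handling needed).

-- ===== PORT A =====
-- Literal port of A: compute the longest row length, start from a zero list of
-- that length, then for each row index i and column index j do `c[j] += l[i][j]`;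
-- only `l[i][j]` can raise (IndexError) here, so the bare `except: pass` becomes
-- the `none => c` branch of the lookup.
def make_composite (l : List (List Int)) : List Int :=
  let longest := l.foldl (fun acc i => if i.length > acc then i.length else acc) 0
  let c0 : List Int := List.replicate longest 0
  (List.range l.length).foldl (fun c i =>
    (List.range longest).foldl (fun c j =>
      match (l.getD i [])[j]? with
      | some v => c.set j (c.getD j 0 + v)
      | none => c) c) c0

-- ===== PORT B =====
-- Literal port of Source B: one pass over the rows, `acc[j] = acc.get(j, 0) + v` for
-- each enumerated element, then `[acc[j] for j in range(len(acc))]`.  The dict's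
-- keys are exactly the enumerate indices 0..len(acc)-1, so Python's `acc[j]`
-- never raises; its lookup is rendered as getD (the default is unreachable).
def make_composite_alt (l : List (List Int)) : List Int :=
  let acc : PySem.Dict Int Int :=
    l.foldl (fun acc row =>
      (PySem.List.enumerate row 0).foldl (fun acc p =>
        acc.insert p.1 (acc.getD p.1 0 + p.2)) acc) PySem.Dict.empty
  (PySem.List.pyRange 0 (acc.size : Int) 1).map (fun j => acc.getD j 0)

-- ===== PRECONDITION & SPEC =====
def Spec_make_composite (l : List (List Int)) (out : List Int) : Prop := out = make_composite_alt l
instance (l : List (List Int)) (out : List Int) : Decidable (Spec_make_composite l out) := by unfold Spec_make_composite; infer_instance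

-- ===== CLAIM (what is proved, stated in full; the proofs are below) =====
def Claim_equal_make_composite : Prop := ∀ (l : List (List Int)), Dom_make_composite l → Spec_make_composite l (make_composite l)

-- ===== LEMMAS AND PROOFS =====

-- structural max of the row lengths
def maxLen (l : List (List Int)) : Nat :=
  match l with
  | [] => 0
  | r :: t => Nat.max r.length (maxLen t)

-- canonical result both ports are reduced to
def colSum (l : List (List Int)) (j : Nat) : Int := (l.map (fun r => r.getD j 0)).sum
def canon (l : List (List Int)) : List Int := (List.range (maxLen l)).map (colSum l)

-- pointwise row addition (truncated to the accumulator's length)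
def addRow : List Int → List Int → List Int
  | [], _ => []
  | c, [] => c
  | a :: c, b :: r => (a + b) :: addRow c r

theorem addRow_length (c r : List Int) : (addRow c r).length = c.length := by
  induction c generalizing r with
  | nil => simp [addRow]
  | cons a c ih => cases r <;> simp [addRow, ih]

theorem addRow_getD (c r : List Int) (k : Nat) (hk : k < c.length) :
    (addRow c r).getD k 0 = c.getD k 0 + r.getD k 0 := by
  induction c generalizing r k with
  | nil => simp at hk
  | cons a c ih =>
    cases r with
    | nil => simp [addRow]
    | cons b r =>
      cases k with
      | zero => simp [addRow]
      | succ k => simp only [addRow, List.getD_cons_succ]; exact ih r k (by simpa using hk)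

theorem ext_getD (c₁ c₂ : List Int) (hl : c₁.length = c₂.length)
    (h : ∀ k, k < c₁.length → c₁.getD k 0 = c₂.getD k 0) : c₁ = c₂ := by
  apply List.ext_getElem hl
  intro k h1 h2
  have := h k h1
  simpa [List.getD_eq_getElem?_getD, List.getElem?_eq_getElem, h1, h2] using this

-- the inner j-loop of A preserves the length of c
theorem innerLoop_length (r : List Int) (js : List Nat) (c : List Int) :
    (js.foldl (fun c j =>
      match r[j]? with
      | some v => c.set j (c.getD j 0 + v)
      | none => c) c).length = c.length := by
  induction js generalizing c with
  | nil => rfl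
  | cons j js ih =>
    simp only [List.foldl_cons]
    rw [ih]
    cases h : r[j]? <;> simp

-- entry k after the inner j-loop, for a duplicate-free index list
theorem innerLoop_getD (r : List Int) (js : List Nat) (c : List Int) (k : Nat)
    (hnd : js.Nodup) (hks : ∀ j ∈ js, j < c.length) (hk : k < c.length) :
    (js.foldl (fun c j =>
      match r[j]? with
      | some v => c.set j (c.getD j 0 + v)
      | none => c) c).getD k 0
    = c.getD k 0 + (if k ∈ js then r.getD k 0 else 0) := by
  induction js generalizing c with
  | nil => simp
  | cons j js ih =>
    simp only [List.foldl_cons]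
    have hj : j < c.length := hks j (by simp)
    have hstep_len : (match r[j]? with
        | some v => c.set j (c.getD j 0 + v)
        | none => c).length = c.length := by
      cases h : r[j]? <;> simp
    have hstep_getD : ∀ m, m < c.length →
        (match r[j]? with
          | some v => c.set j (c.getD j 0 + v)
          | none => c).getD m 0
        = c.getD m 0 + (if m = j then r.getD j 0 else 0) := by
      intro m hm
      cases h : r[j]? with
      | none =>
        have hlen : r.length ≤ j := List.getElem?_eq_none_iff.mp h
        by_cases hmj : m = j
        · subst hmj; simp [List.getD_eq_getElem?_getD, h]
        · simp [hmj]
      | some v =>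
        have hjr : j < r.length := by
          by_contra hc
          simp [List.getElem?_eq_none_iff.mpr (Nat.le_of_not_lt hc)] at h
        have hv : r.getD j 0 = v := by
          simp [List.getD_eq_getElem?_getD, h]
        by_cases hmj : m = j
        · subst hmj
          simp [List.getD_eq_getElem?_getD, List.getElem?_set_self hj, h]
        · simp [List.getD_eq_getElem?_getD, List.getElem?_set_ne (fun h' => hmj h'.symm), hmj]
    rw [ih _ (List.Nodup.of_cons hnd)
        (fun j' hj' => by rw [hstep_len]; exact hks j' (by simp [hj']))
        (by rw [hstep_len]; exact hk)]
    rw [hstep_getD k hk]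
    have hjnotin : j ∉ js := by simpa using (List.nodup_cons.mp hnd).1
    by_cases hkj : k = j
    · subst hkj
      simp [hjnotin]
    · simp [hkj, List.mem_cons]

-- the inner j-loop over range c.length is exactly addRow
theorem innerLoop_eq_addRow (r c : List Int) :
    ((List.range c.length).foldl (fun c j =>
      match r[j]? with
      | some v => c.set j (c.getD j 0 + v)
      | none => c) c) = addRow c r := by
  apply ext_getD _ _ (by rw [innerLoop_length, addRow_length])
  intro k hk
  rw [innerLoop_length] at hk
  rw [innerLoop_getD r _ c k (List.nodup_range) (fun j hj => by simpa using hj) hk,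
    addRow_getD c r k hk]
  simp [hk]

-- the outer i-loop over indices is the fold of addRow over the rows
theorem outer_range_eq_foldl (l : List (List Int)) (g : List Int → List Int → List Int)
    (c : List Int) :
    (List.range l.length).foldl (fun c i => g c (l.getD i [])) c = l.foldl g c := by
  induction l using List.reverseRecOn generalizing c with
  | nil => simp
  | append_singleton t r ih =>
    simp only [List.length_append, List.length_cons, List.length_nil]
    rw [List.range_succ, List.foldl_append, List.foldl_append]
    have hpre : (List.range t.length).foldl (fun c i => g c ((t ++ [r]).getD i [])) c
        = (List.range t.length).foldl (fun c i => g c (t.getD i [])) c := by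
      apply List.foldl_ext
      intro c' i hi
      have hi' : i < t.length := by simpa using hi
      rw [List.getD_eq_getElem?_getD, List.getD_eq_getElem?_getD,
        List.getElem?_append_left hi']
    rw [hpre, ih]
    simp [List.getD_eq_getElem?_getD]

theorem foldl_addRow_length (rows : List (List Int)) (c : List Int) :
    (rows.foldl addRow c).length = c.length := by
  induction rows generalizing c with
  | nil => rfl
  | cons r t ih => simp [List.foldl_cons, ih, addRow_length]

theorem foldl_addRow_getD (rows : List (List Int)) (c : List Int) (k : Nat)
    (hk : k < c.length) :
    (rows.foldl addRow c).getD k 0 = c.getD k 0 + colSum rows k := by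
  induction rows generalizing c with
  | nil => simp [colSum]
  | cons r t ih =>
    simp only [List.foldl_cons]
    rw [ih (addRow c r) (by rw [addRow_length]; exact hk), addRow_getD c r k hk]
    simp [colSum, add_assoc]

theorem foldl_ifmax (l : List (List Int)) (a : Nat) :
    l.foldl (fun acc i => if i.length > acc then i.length else acc) a = Nat.max a (maxLen l) := by
  induction l generalizing a with
  | nil => simp [maxLen]
  | cons r t ih =>
    simp only [List.foldl_cons, maxLen]
    rw [ih]
    simp only [Nat.max_def]
    split_ifs <;> omega

-- A equals the canonical column-sum list
theorem make_composite_eq_canon (l : List (List Int)) : make_composite l = canon l := by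
  unfold make_composite
  rw [foldl_ifmax l 0]
  have hz : Nat.max 0 (maxLen l) = maxLen l := by simp only [Nat.max_def]; split_ifs <;> omega
  rw [hz]
  have main : ∀ (idxs : List Nat) (c : List Int), c.length = maxLen l →
      idxs.foldl (fun c i =>
        (List.range (maxLen l)).foldl (fun c j =>
          match (l.getD i [])[j]? with
          | some v => c.set j (c.getD j 0 + v)
          | none => c) c) c
      = idxs.foldl (fun c i => addRow c (l.getD i [])) c := by
    intro idxs
    induction idxs with
    | nil => intro c _; rfl
    | cons i idxs ih =>
      intro c hc
      simp only [List.foldl_cons]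
      have hstep := innerLoop_eq_addRow (l.getD i []) c
      rw [hc] at hstep
      rw [hstep, ih _ (by rw [addRow_length]; exact hc)]
  rw [main _ _ (by simp), outer_range_eq_foldl l addRow]
  apply ext_getD _ _ (by simp [foldl_addRow_length, canon])
  intro k hk
  rw [foldl_addRow_length] at hk
  simp only [List.length_replicate] at hk
  rw [foldl_addRow_getD l _ k (by simpa using hk)]
  simp [canon, List.getD_eq_getElem?_getD, hk, colSum]

-- ===== B-side lemmas =====

-- the contribution of one row (enumerated from start s) to dict entry j
def colAt (row : List Int) (s j : Int) : Int :=
  if s ≤ j ∧ j < s + row.length then row.getD (j - s).toNat 0 else 0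

theorem rowFold_getD (row : List Int) (s j : Int) (d : PySem.Dict Int Int) :
    ((PySem.List.enumerate row s).foldl (fun d p =>
      d.insert p.1 (d.getD p.1 0 + p.2)) d).getD j 0
    = d.getD j 0 + colAt row s j := by
  induction row generalizing s d with
  | nil =>
    simp only [PySem.List.enumerate_nil, List.foldl_nil, colAt, List.length_nil]
    have hno : ¬ (s ≤ j ∧ j < s + ((0:Nat) : Int)) := by push_cast; omega
    rw [if_neg hno]
    ring
  | cons x t ih =>
    rw [PySem.List.enumerate_cons, List.foldl_cons, ih]
    rw [PySem.Dict.getD_insert]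
    by_cases hjs : j = s
    · subst hjs
      have h1 : colAt t (j + 1) j = 0 := by
        unfold colAt; split_ifs with h; · omega
        · rfl
      have h2 : colAt (x :: t) j j = x := by
        unfold colAt
        have hcond : j ≤ j ∧ j < j + ((x :: t).length : Int) := by
          simp only [List.length_cons]
          push_cast
          omega
        rw [if_pos hcond]
        simp
      rw [h1, h2]; simp
    · rw [if_neg hjs]
      have : colAt t (s + 1) j = colAt (x :: t) s j := by
        unfold colAt
        simp only [List.length_cons]
        split_ifs with h1 h2 h2
        · have hge : s + 1 ≤ j := h1.1
          have : (j - s).toNat = (j - (s + 1)).toNat + 1 := by omega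
          rw [this, List.getD_cons_succ]
        · exfalso; push_cast at h1 h2; omega
        · exfalso
          push_cast at h1 h2
          have : j ≠ s := hjs
          omega
        · rfl
      rw [this]

-- dict entry j after all rows: the initial value plus the column sums
theorem allRows_getD (rows : List (List Int)) (d : PySem.Dict Int Int) (j : Int) :
    (rows.foldl (fun d row =>
      (PySem.List.enumerate row 0).foldl (fun d p =>
        d.insert p.1 (d.getD p.1 0 + p.2)) d) d).getD j 0
    = d.getD j 0 + (rows.map (fun row => colAt row 0 j)).sum := by
  induction rows generalizing d with
  | nil => simp
  | cons r t ih =>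
    simp only [List.foldl_cons, List.map_cons, List.sum_cons]
    rw [ih, rowFold_getD]
    ring

theorem colAt_zero_nat (row : List Int) (k : Nat) : colAt row 0 (k : Int) = row.getD k 0 := by
  unfold colAt
  split_ifs with h
  · have ht : ((k : Int) - 0).toNat = k := by omega
    rw [ht]
  · push_cast at h
    have hout : row.length ≤ k := by omega
    rw [List.getD_eq_default _ _ hout]

-- Set.update of two initial integer ranges is the initial range of the max
theorem update_range (m n : Nat) :
    PySem.Set.update (PySem.List.pyRange 0 (m : Int) 1) (PySem.List.pyRange 0 (n : Int) 1)
    = PySem.List.pyRange 0 ((max m n : Nat) : Int) 1 := by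
  induction n with
  | zero =>
    have h0 : PySem.List.pyRange 0 ((0:Nat) : Int) 1 = [] :=
      PySem.List.pyRange_one_eq_nil (by norm_num)
    have hm : max m 0 = m := by omega
    rw [hm]
    rw [h0]
    simp [PySem.Set.update]
  | succ n ih =>
    have hsplit : PySem.List.pyRange 0 ((n + 1 : Nat) : Int) 1
        = PySem.List.pyRange 0 (n : Int) 1 ++ [(n : Int)] := by
      have hc : ((n + 1 : Nat) : Int) = (n : Int) + 1 := by push_cast; ring
      rw [hc]
      exact PySem.List.pyRange_one_succ_right (by positivity)
    rw [hsplit]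
    unfold PySem.Set.update at *
    rw [List.foldl_append, ih]
    simp only [List.foldl_cons, List.foldl_nil]
    rcases Nat.lt_or_ge n m with hnm | hnm
    · have hmax : max m n = m := by omega
      have hmax1 : max m (n + 1) = m := by omega
      rw [hmax, hmax1]
      have hmem : (n : Int) ∈ PySem.List.pyRange 0 (m : Int) 1 :=
        PySem.List.mem_pyRange_one.mpr
          ⟨by exact_mod_cast Nat.zero_le n, by exact_mod_cast hnm⟩
      have hc : PySem.Set.contains (PySem.List.pyRange 0 (m : Int) 1) (n : Int) = true := by
        simp [PySem.Set.contains, hmem]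
      rw [PySem.Set.add, if_pos hc]
    · have hmax : max m n = n := by omega
      have hmax1 : max m (n + 1) = n + 1 := by omega
      rw [hmax, hmax1]
      have hmem : (n : Int) ∉ PySem.List.pyRange 0 (n : Int) 1 := by
        intro hc
        have h2 := (PySem.List.mem_pyRange_one.mp hc).2
        exact absurd h2 (by omega)
      have hc : PySem.Set.contains (PySem.List.pyRange 0 (n : Int) 1) (n : Int) = false := by
        simp [PySem.Set.contains, hmem]
      rw [PySem.Set.add, if_neg (by rw [hc]; exact Bool.false_ne_true)]
      have hc1 : ((n + 1 : Nat) : Int) = (n : Int) + 1 := by push_cast; ring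
      rw [hc1, PySem.List.pyRange_one_succ_right (by positivity)]

-- keys of the accumulator dict: exactly 0..maxLen-1, in order
theorem allRows_keys (rows : List (List Int)) (d : PySem.Dict Int Int) (m : Nat)
    (hd : d.keys = PySem.List.pyRange 0 (m : Int) 1) :
    (rows.foldl (fun d row =>
      (PySem.List.enumerate row 0).foldl (fun d p =>
        d.insert p.1 (d.getD p.1 0 + p.2)) d) d).keys
    = PySem.List.pyRange 0 ((max m (maxLen rows) : Nat) : Int) 1 := by
  induction rows generalizing d m with
  | nil =>
    simp only [List.foldl_nil, maxLen]
    have hm : max m 0 = m := by omega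
    rw [hd, hm]
  | cons r t ih =>
    simp only [List.foldl_cons]
    have hkeys : ((PySem.List.enumerate r 0).foldl (fun d p =>
        d.insert p.1 (d.getD p.1 0 + p.2)) d).keys
        = PySem.Set.update d.keys ((PySem.List.enumerate r 0).map (·.1)) :=
      PySem.Dict.keys_foldl_insert_key _ _ _ _
    have hfst : (PySem.List.enumerate r 0).map (·.1) = PySem.List.pyRange 0 (r.length : Int) 1 := by
      rw [PySem.List.map_fst_enumerate]; norm_num
    rw [ih _ (max m r.length) (by rw [hkeys, hd, hfst, update_range])]
    simp only [maxLen]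
    have hconv : Nat.max r.length (maxLen t) = max r.length (maxLen t) := rfl
    rw [hconv]
    have hassoc : max (max m r.length) (maxLen t) = max m (max r.length (maxLen t)) := by omega
    rw [hassoc]

-- B equals the canonical column-sum list
def accOf (l : List (List Int)) : PySem.Dict Int Int :=
  l.foldl (fun acc row =>
    (PySem.List.enumerate row 0).foldl (fun acc p =>
      acc.insert p.1 (acc.getD p.1 0 + p.2)) acc) PySem.Dict.empty

theorem make_composite_alt_eq_canon (l : List (List Int)) : make_composite_alt l = canon l := by
  show (PySem.List.pyRange 0 ((accOf l).size : Int) 1).map (fun j => (accOf l).getD j 0) = canon l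
  have hkeys := allRows_keys l PySem.Dict.empty 0 (by
    rw [PySem.Dict.keys_empty]
    rw [PySem.List.pyRange_one_eq_nil (by norm_num)])
  have hm0 : max 0 (maxLen l) = maxLen l := by omega
  rw [hm0] at hkeys
  have hsize : (accOf l).size = maxLen l := by
    have h1 : (accOf l).keys.length = (accOf l).size := by
      simp [PySem.Dict.keys, PySem.Dict.size]
    rw [← h1, accOf, hkeys, PySem.List.length_pyRange_one]
    omega
  have hget : ∀ k : Nat, (accOf l).getD (k : Int) 0 = colSum l k := by
    intro k
    rw [accOf, allRows_getD, PySem.Dict.getD_empty]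
    have hs : (l.map (fun row => colAt row 0 (k : Int))).sum = colSum l k := by
      unfold colSum
      congr 1
      exact List.map_congr_left (fun r _ => colAt_zero_nat r k)
    rw [hs]; ring
  rw [hsize, PySem.List.pyRange_one]
  unfold canon
  have hln : ((maxLen l : Int) - 0).toNat = maxLen l := by omega
  rw [hln, List.map_map]
  apply List.map_congr_left
  intro k _
  have h0 : ((0 : Int) + k) = (k : Int) := by ring
  simp only [Function.comp, h0]
  exact hget k

-- ===== VERDICT (by name: the statement is the Claim_ definition above) =====
theorem make_composite_spec : Claim_equal_make_composite := by
  intro l _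
  unfold Spec_make_composite
  rw [make_composite_eq_canon, make_composite_alt_eq_canon]
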